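-- pv_equiv track=rewrite | github.com/ilyes-rhdi/Micro_code | chall16/solve.py | leap_state_mod_p
-- ===== SOURCE A (Python) =====
-- def leap_state_mod_p(s0: int, mult: int, inc: int, t: int, mod_p: int) -> int:
--     acc_mult = 1 % mod_p
--     acc_inc = 0
--     cur_mult = mult % mod_p
--     cur_inc = inc % mod_p
--
--     while t > 0:
--         if t & 1:
--             acc_inc = (acc_inc * cur_mult + cur_inc) % mod_p
--             acc_mult = (acc_mult * cur_mult) % mod_p
--         cur_inc = (cur_inc * (cur_mult + 1)) % mod_p
--         cur_mult = (cur_mult * cur_mult) % mod_p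
--         t >>= 1
--
--     return (acc_mult * (s0 % mod_p) + acc_inc) % mod_p
-- ===== SOURCE B (Python) =====
-- def leap_state_mod_p(s0: int, mult: int, inc: int, t: int, mod_p: int) -> int:
--     n = t if t > 0 else 0
--
--     def powmod(r, k):
--         # r^k mod mod_p by binary powering (plain %, no 3-arg pow)
--         if k == 0:
--             return 1 % mod_p
--         h = powmod(r, k // 2)
--         h = (h * h) % mod_p
--         if k % 2 == 1:
--             h = (h * r) % mod_p
--         return h
--
--     def geosum(r, k):
--         # (1 + r + ... + r^(k-1)) mod mod_p, divide and conquer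
--         if k == 0:
--             return 0
--         if k % 2 == 0:
--             return (geosum(r, k // 2) * (1 + powmod(r, k // 2))) % mod_p
--         return (1 + r * geosum(r, k - 1)) % mod_p
--
--     return (powmod(mult, n) * (s0 % mod_p) + inc * geosum(mult, n)) % mod_p
-- ===== Notes on version B (the rewrite author's own statement) =====
-- stated objective: alternative
-- what changed: Replaces A's fused affine square-and-multiply loop (which carries a combined (acc_mult, acc_inc) affine state) by two independent computations — mult^t mod p by recursive binary powering and the geometric series sum by a divide-and-conquer recurrence — combined as (M*(s0%p) + inc*G) % p.
import Mathlib
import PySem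

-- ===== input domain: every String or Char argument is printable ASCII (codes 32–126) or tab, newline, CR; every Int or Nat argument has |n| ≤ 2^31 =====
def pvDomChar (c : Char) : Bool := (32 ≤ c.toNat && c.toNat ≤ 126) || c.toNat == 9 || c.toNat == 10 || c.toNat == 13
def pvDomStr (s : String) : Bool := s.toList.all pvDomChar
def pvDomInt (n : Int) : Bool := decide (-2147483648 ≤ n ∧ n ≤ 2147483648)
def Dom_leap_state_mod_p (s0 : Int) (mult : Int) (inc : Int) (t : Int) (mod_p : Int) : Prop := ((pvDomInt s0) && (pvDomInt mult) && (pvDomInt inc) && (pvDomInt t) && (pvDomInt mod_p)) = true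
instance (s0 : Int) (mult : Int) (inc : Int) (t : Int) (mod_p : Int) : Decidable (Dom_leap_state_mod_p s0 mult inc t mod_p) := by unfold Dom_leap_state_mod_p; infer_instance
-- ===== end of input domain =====

-- B computes the affine-LCG jump as two independent pieces — a binary power mult^t mod p and a
-- divide-and-conquer geometric sum — instead of A's fused affine square-and-multiply loop (objective: alternative).


-- termination helper for the while-loop port (t >>= 1 strictly shrinks a positive t)
theorem pvShiftOne (t : Int) (h : 0 < t) : t >>> (1:Nat) = ((t.toNat / 2 : Nat) : Int) := by
  rcases t with m | m
  · show ((m >>> 1 : Nat) : Int) = _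
    rw [Nat.shiftRight_one]; rfl
  · exact absurd h (not_lt.mpr (le_of_lt (Int.negSucc_lt_zero m)))

-- ===== PORT A =====
-- the while-loop of A: state (acc_mult, acc_inc, cur_mult, cur_inc), Python's `t & 1` truthiness and `t >>= 1`
def leapLoopA (mod_p acc_mult acc_inc cur_mult cur_inc t : Int) : Int × Int :=
  if h : 0 < t then
    let (acc_mult', acc_inc') :=
      if PySem.Int.band t 1 ≠ 0 then
        (PySem.Int.mod (acc_mult * cur_mult) mod_p,
         PySem.Int.mod (acc_inc * cur_mult + cur_inc) mod_p)
      else (acc_mult, acc_inc)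
    leapLoopA mod_p acc_mult' acc_inc'
      (PySem.Int.mod (cur_mult * cur_mult) mod_p)
      (PySem.Int.mod (cur_inc * (cur_mult + 1)) mod_p)
      (t >>> (1:Nat))
  else (acc_mult, acc_inc)
  termination_by t.toNat
  decreasing_by rw [pvShiftOne t h]; simp; omega

def leap_state_mod_p (s0 : Int) (mult : Int) (inc : Int) (t : Int) (mod_p : Int) : Int :=
  let acc_mult := PySem.Int.mod 1 mod_p
  let acc_inc : Int := 0
  let cur_mult := PySem.Int.mod mult mod_p
  let cur_inc := PySem.Int.mod inc mod_p
  let r := leapLoopA mod_p acc_mult acc_inc cur_mult cur_inc t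
  PySem.Int.mod (r.1 * PySem.Int.mod s0 mod_p + r.2) mod_p

-- ===== PORT B =====
-- r^k mod mod_p by binary powering (Source B's powmod)
def pvPowmod (mod_p r : Int) (k : Nat) : Int :=
  if k = 0 then PySem.Int.mod 1 mod_p
  else
    let h := pvPowmod mod_p r (k / 2)
    let h := PySem.Int.mod (h * h) mod_p
    if k % 2 = 1 then PySem.Int.mod (h * r) mod_p else h
  termination_by k
  decreasing_by omega

-- (1 + r + … + r^(k-1)) mod mod_p by divide and conquer (Source B's geosum)
def pvGeosum (mod_p r : Int) (k : Nat) : Int :=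
  if k = 0 then 0
  else if k % 2 = 0 then
    PySem.Int.mod (pvGeosum mod_p r (k / 2) * (1 + pvPowmod mod_p r (k / 2))) mod_p
  else PySem.Int.mod (1 + r * pvGeosum mod_p r (k - 1)) mod_p
  termination_by k
  decreasing_by all_goals omega

def leap_state_mod_p_alt (s0 : Int) (mult : Int) (inc : Int) (t : Int) (mod_p : Int) : Int :=
  let n : Nat := if 0 < t then t.toNat else 0
  PySem.Int.mod (pvPowmod mod_p mult n * PySem.Int.mod s0 mod_p + inc * pvGeosum mod_p mult n) mod_p

-- ===== PRECONDITION & SPEC =====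
-- Pre_ excludes exactly mod_p = 0, where Python's `%` (both in A and in B) raises ZeroDivisionError.
def Pre_leap_state_mod_p (s0 : Int) (mult : Int) (inc : Int) (t : Int) (mod_p : Int) : Prop := mod_p ≠ 0
instance (s0 : Int) (mult : Int) (inc : Int) (t : Int) (mod_p : Int) : Decidable (Pre_leap_state_mod_p s0 mult inc t mod_p) := by unfold Pre_leap_state_mod_p; infer_instance
def pvWitness_leap_state_mod_p : Int × Int × Int × Int × Int := (7, 3, 5, 10, 11)

def Spec_leap_state_mod_p (s0 : Int) (mult : Int) (inc : Int) (t : Int) (mod_p : Int) (out : Int) : Prop := out = leap_state_mod_p_alt s0 mult inc t mod_p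
instance (s0 : Int) (mult : Int) (inc : Int) (t : Int) (mod_p : Int) (out : Int) : Decidable (Spec_leap_state_mod_p s0 mult inc t mod_p out) := by unfold Spec_leap_state_mod_p; infer_instance

-- ===== CLAIM (what is proved, stated in full; the proofs are below) =====
def Claim_equal_leap_state_mod_p : Prop := ∀ (s0 : Int) (mult : Int) (inc : Int) (t : Int) (mod_p : Int), Dom_leap_state_mod_p s0 mult inc t mod_p → Pre_leap_state_mod_p s0 mult inc t mod_p → Spec_leap_state_mod_p s0 mult inc t mod_p (leap_state_mod_p s0 mult inc t mod_p)

-- ===== LEMMAS AND PROOFS =====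

-- Python `%` respects congruence mod the divisor
theorem pymod_congr (p a b : Int) (hp : p ≠ 0) (h : p ∣ a - b) : PySem.Int.mod a p = PySem.Int.mod b p := by
  obtain ⟨k, hk⟩ := h
  have h1 := PySem.Int.floordiv_mul_add_mod a p
  have h2 := PySem.Int.floordiv_mul_add_mod b p
  set K := k - PySem.Int.floordiv a p + PySem.Int.floordiv b p with hK
  have hd : PySem.Int.mod a p - PySem.Int.mod b p = p * K := by rw [hK]; nlinarith [h1, h2, hk]
  have hz : K = 0 := by
    by_contra hne
    rcases lt_or_gt_of_ne hne with hlt | hgt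
    all_goals rcases lt_or_gt_of_ne hp with hneg | hpos
    · have := mul_le_mul_of_nonpos_left (by omega : K ≤ -1) (le_of_lt hneg)
      have b1 := PySem.Int.mod_neg_bounds a hneg; have b2 := PySem.Int.mod_neg_bounds b hneg
      nlinarith
    · have := mul_le_mul_of_nonneg_left (by omega : K ≤ -1) (le_of_lt hpos)
      have b1 := PySem.Int.mod_nonneg a hpos; have b2 := PySem.Int.mod_lt b hpos
      nlinarith
    · have := mul_le_mul_of_nonpos_left (by omega : (1:Int) ≤ K) (le_of_lt hneg)
      have b1 := PySem.Int.mod_neg_bounds a hneg; have b2 := PySem.Int.mod_neg_bounds b hneg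
      nlinarith
    · have := mul_le_mul_of_nonneg_left (by omega : (1:Int) ≤ K) (le_of_lt hpos)
      have b1 := PySem.Int.mod_lt a hpos; have b2 := PySem.Int.mod_nonneg b hpos
      nlinarith
  rw [hz, mul_zero] at hd; omega

theorem pymod_modEq (a p : Int) : PySem.Int.mod a p ≡ a [ZMOD p] :=
  Int.modEq_iff_dvd.mpr ⟨PySem.Int.floordiv a p, by linarith [PySem.Int.floordiv_mul_add_mod a p]⟩

theorem pymod_eq_of_modEq (p a b : Int) (hp : p ≠ 0) (h : a ≡ b [ZMOD p]) : PySem.Int.mod a p = PySem.Int.mod b p :=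
  pymod_congr p a b hp (Int.ModEq.dvd h.symm)

theorem pymod_zero (p : Int) : PySem.Int.mod 0 p = 0 := by
  simp [PySem.Int.mod]

-- the exact geometric sum 1 + r + … + r^(n-1)
def pvGeo (r : Int) : Nat → Int
  | 0 => 0
  | n+1 => 1 + r * pvGeo r n

theorem pvGeo_shift (r : Int) : ∀ n, 1 + r * pvGeo r n = pvGeo r n + r ^ n := by
  intro n
  induction n with
  | zero => simp [pvGeo]
  | succ n ih => simp only [pvGeo, pow_succ]; linear_combination r * ih

theorem pvGeo_succ' (r : Int) (n : Nat) : pvGeo r (n+1) = pvGeo r n + r ^ n := pvGeo_shift r n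

-- even split used by B: geo r (2m) = geo r m * (1 + r^m)
theorem pvGeo_double (r : Int) : ∀ m, pvGeo r (2*m) = pvGeo r m * (1 + r ^ m) := by
  intro m
  induction m with
  | zero => simp [pvGeo]
  | succ m ih =>
    rw [show 2*(m+1) = (2*m+1)+1 from by ring, pvGeo_succ', pvGeo_succ', ih, pvGeo_succ',
        pow_succ, pow_mul]
    have hs := pvGeo_shift r m
    linear_combination (-(r ^ m)) * hs

-- odd/even split used by A's fused loop: geo r (2m) = (r+1) * geo (r²) m
theorem pvGeo_double2 (r : Int) : ∀ m, pvGeo r (2*m) = (r + 1) * pvGeo (r^2) m := by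
  intro m
  induction m with
  | zero => simp [pvGeo]
  | succ m ih =>
    rw [show 2*(m+1) = (2*m+1)+1 from by ring, pvGeo_succ', pvGeo_succ', ih,
        pvGeo_succ' (r^2) m, pow_succ, pow_mul]
    ring

theorem pvGeo_modEq (p a b : Int) (h : a ≡ b [ZMOD p]) : ∀ n, pvGeo a n ≡ pvGeo b n [ZMOD p] := by
  intro n
  induction n with
  | zero => rfl
  | succ n ih => exact (Int.ModEq.refl 1).add (h.mul ih)

theorem pvPowmod_spec (p r : Int) (hp : p ≠ 0) : ∀ k, pvPowmod p r k = PySem.Int.mod (r ^ k) p := by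
  intro k
  induction k using Nat.strong_induction_on with
  | _ k ih =>
    rw [pvPowmod]
    by_cases h0 : k = 0
    · simp [h0]
    · simp only [h0, if_false]
      rw [ih (k/2) (by omega)]
      have key : PySem.Int.mod (PySem.Int.mod (r ^ (k/2)) p * PySem.Int.mod (r ^ (k/2)) p) p
          = PySem.Int.mod (r ^ (k/2) * r ^ (k/2)) p :=
        pymod_eq_of_modEq p _ _ hp ((pymod_modEq _ p).mul (pymod_modEq _ p))
      by_cases hodd : k % 2 = 1
      · simp only [hodd, if_true, key]
        have : PySem.Int.mod (PySem.Int.mod (r ^ (k/2) * r ^ (k/2)) p * r) p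
            = PySem.Int.mod ((r ^ (k/2) * r ^ (k/2)) * r) p :=
          pymod_eq_of_modEq p _ _ hp ((pymod_modEq _ p).mul (Int.ModEq.refl r))
        rw [this]
        congr 1
        rw [← pow_add, ← pow_succ]
        congr 1
        omega
      · simp only [hodd, if_false, key]
        congr 1
        rw [← pow_add]
        congr 1
        omega

theorem pvGeosum_spec (p r : Int) (hp : p ≠ 0) : ∀ k, pvGeosum p r k = PySem.Int.mod (pvGeo r k) p := by
  intro k
  induction k using Nat.strong_induction_on with
  | _ k ih =>
    rw [pvGeosum]
    by_cases h0 : k = 0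
    · simp [h0, pvGeo, pymod_zero]
    · simp only [h0, if_false]
      by_cases heven : k % 2 = 0
      · simp only [heven, if_true]
        rw [ih (k/2) (by omega), pvPowmod_spec p r hp]
        have : PySem.Int.mod (PySem.Int.mod (pvGeo r (k/2)) p * (1 + PySem.Int.mod (r ^ (k/2)) p)) p
            = PySem.Int.mod (pvGeo r (k/2) * (1 + r ^ (k/2))) p :=
          pymod_eq_of_modEq p _ _ hp ((pymod_modEq _ p).mul ((Int.ModEq.refl 1).add (pymod_modEq _ p)))
        rw [this, ← pvGeo_double]
        congr 2
        omega
      · simp only [heven, if_false]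
        rw [ih (k-1) (by omega)]
        have : PySem.Int.mod (1 + r * PySem.Int.mod (pvGeo r (k-1)) p) p
            = PySem.Int.mod (1 + r * pvGeo r (k-1)) p :=
          pymod_eq_of_modEq p _ _ hp ((Int.ModEq.refl 1).add ((Int.ModEq.refl r).mul (pymod_modEq _ p)))
        rw [this, show (1 + r * pvGeo r (k-1)) = pvGeo r ((k-1)+1) from rfl]
        congr 2
        omega

-- the two pure identities behind one step of A's fused loop
theorem pvKeyEven (aI cI cM : Int) (m : Nat) :
    aI * (cM^2) ^ m + cI * (cM+1) * pvGeo (cM^2) m = aI * cM ^ (2*m) + cI * pvGeo cM (2*m) := by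
  rw [pvGeo_double2, ← pow_mul]; ring

theorem pvKeyOdd (aI cI cM : Int) (m : Nat) :
    (aI * cM + cI) * (cM^2) ^ m + cI * (cM+1) * pvGeo (cM^2) m
      = aI * cM ^ (2*m+1) + cI * pvGeo cM (2*m+1) := by
  rw [show (2*m+1) = (2*m)+1 from rfl, pvGeo_succ', pvGeo_double2, ← pow_mul, pow_succ]; ring

-- invariant of A's loop, at congruence level
theorem leapLoopA_spec (p : Int) (hp : p ≠ 0) : ∀ N t aM aI cM cI, t.toNat ≤ N →
    ((leapLoopA p aM aI cM cI t).1 ≡ aM * cM ^ t.toNat [ZMOD p]) ∧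
    ((leapLoopA p aM aI cM cI t).2 ≡ aI * cM ^ t.toNat + cI * pvGeo cM t.toNat [ZMOD p]) := by
  intro N
  induction N with
  | zero =>
    intro t aM aI cM cI hle
    have ht : ¬ 0 < t := by omega
    rw [leapLoopA, dif_neg ht]
    rw [(by omega : t.toNat = 0)]
    exact ⟨by simp, by simp [pvGeo]⟩
  | succ N ihN =>
    intro t aM aI cM cI hle
    by_cases ht : 0 < t
    · rw [leapLoopA, dif_pos ht]
      have hsh := pvShiftOne t ht
      have hlt : ((t >>> (1:Nat)).toNat) = t.toNat / 2 := by rw [hsh]; simp; omega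
      have hmod2 : PySem.Int.band t 1 = ((t.toNat % 2 : Nat) : Int) := by
        rw [PySem.Int.band_one, PySem.Int.mod_eq_emod_of_pos (by norm_num)]
        omega
      have hsq : cM * cM = cM ^ 2 := by ring
      by_cases hband : PySem.Int.band t 1 ≠ 0
      · simp only [if_pos hband]
        have hodd : t.toNat % 2 = 1 := by rw [hmod2] at hband; omega
        obtain ⟨m, hm⟩ : ∃ m, t.toNat = 2*m+1 := ⟨t.toNat/2, by omega⟩
        obtain ⟨ih1, ih2⟩ := ihN (t >>> (1:Nat))
          (PySem.Int.mod (aM * cM) p) (PySem.Int.mod (aI * cM + cI) p)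
          (PySem.Int.mod (cM * cM) p) (PySem.Int.mod (cI * (cM + 1)) p)
          (by omega)
        rw [hlt, (by omega : t.toNat / 2 = m)] at ih1 ih2
        rw [hm]
        constructor
        · have c1 : PySem.Int.mod (aM*cM) p * (PySem.Int.mod (cM*cM) p)^m ≡ (aM*cM) * (cM*cM)^m [ZMOD p] :=
            (pymod_modEq _ p).mul ((pymod_modEq _ p).pow m)
          have e1 : (aM*cM) * (cM*cM)^m = aM * cM^(2*m+1) := by
            rw [hsq, ← pow_mul]; ring
          have := ih1.trans c1
          rw [e1] at this
          exact this
        · have c2 : PySem.Int.mod (aI*cM+cI) p * (PySem.Int.mod (cM*cM) p)^m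
              + PySem.Int.mod (cI*(cM+1)) p * pvGeo (PySem.Int.mod (cM*cM) p) m
              ≡ (aI*cM+cI) * (cM*cM)^m + cI*(cM+1) * pvGeo (cM*cM) m [ZMOD p] :=
            ((pymod_modEq _ p).mul ((pymod_modEq _ p).pow m)).add
              ((pymod_modEq _ p).mul (pvGeo_modEq p _ _ (pymod_modEq _ p) m))
          have e2 : (aI*cM+cI) * (cM*cM)^m + cI*(cM+1) * pvGeo (cM*cM) m
              = aI * cM^(2*m+1) + cI * pvGeo cM (2*m+1) := by
            rw [hsq]; exact pvKeyOdd aI cI cM m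
          have := ih2.trans c2
          rw [e2] at this
          exact this
      · simp only [if_neg hband]
        have heven : t.toNat % 2 = 0 := by rw [hmod2] at hband; omega
        obtain ⟨m, hm⟩ : ∃ m, t.toNat = 2*m := ⟨t.toNat/2, by omega⟩
        obtain ⟨ih1, ih2⟩ := ihN (t >>> (1:Nat)) aM aI
          (PySem.Int.mod (cM * cM) p) (PySem.Int.mod (cI * (cM + 1)) p)
          (by omega)
        rw [hlt, (by omega : t.toNat / 2 = m)] at ih1 ih2
        rw [hm]
        constructor
        · have c1 : aM * (PySem.Int.mod (cM*cM) p)^m ≡ aM * (cM*cM)^m [ZMOD p] :=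
            (Int.ModEq.refl aM).mul ((pymod_modEq _ p).pow m)
          have e1 : aM * (cM*cM)^m = aM * cM^(2*m) := by rw [hsq, ← pow_mul]
          have := ih1.trans c1
          rw [e1] at this
          exact this
        · have c2 : aI * (PySem.Int.mod (cM*cM) p)^m
              + PySem.Int.mod (cI*(cM+1)) p * pvGeo (PySem.Int.mod (cM*cM) p) m
              ≡ aI * (cM*cM)^m + cI*(cM+1) * pvGeo (cM*cM) m [ZMOD p] :=
            ((Int.ModEq.refl aI).mul ((pymod_modEq _ p).pow m)).add
              ((pymod_modEq _ p).mul (pvGeo_modEq p _ _ (pymod_modEq _ p) m))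
          have e2 : aI * (cM*cM)^m + cI*(cM+1) * pvGeo (cM*cM) m
              = aI * cM^(2*m) + cI * pvGeo cM (2*m) := by
            rw [hsq]; exact pvKeyEven aI cI cM m
          have := ih2.trans c2
          rw [e2] at this
          exact this
    · rw [leapLoopA, dif_neg ht]
      rw [(by omega : t.toNat = 0)]
      exact ⟨by simp, by simp [pvGeo]⟩

-- ===== VERDICT (by name: the statement is the Claim_ definition above) =====
theorem leap_state_mod_p_spec : Claim_equal_leap_state_mod_p := by
  intro s0 mult inc t mod_p _hdom hp
  have hp : mod_p ≠ 0 := hp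
  unfold Spec_leap_state_mod_p leap_state_mod_p leap_state_mod_p_alt
  simp only []
  have hn : (if 0 < t then t.toNat else 0) = t.toNat := by split <;> omega
  rw [hn, pvPowmod_spec _ _ hp, pvGeosum_spec _ _ hp]
  obtain ⟨h1, h2⟩ := leapLoopA_spec mod_p hp t.toNat t
    (PySem.Int.mod 1 mod_p) 0 (PySem.Int.mod mult mod_p) (PySem.Int.mod inc mod_p) (le_refl _)
  have c1 : PySem.Int.mod 1 mod_p * (PySem.Int.mod mult mod_p) ^ t.toNat ≡ mult ^ t.toNat [ZMOD mod_p] := by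
    have := (pymod_modEq 1 mod_p).mul ((pymod_modEq mult mod_p).pow t.toNat)
    rwa [one_mul] at this
  have c2 : (0:Int) * (PySem.Int.mod mult mod_p) ^ t.toNat
      + PySem.Int.mod inc mod_p * pvGeo (PySem.Int.mod mult mod_p) t.toNat
      ≡ inc * pvGeo mult t.toNat [ZMOD mod_p] := by
    exact (((Int.ModEq.refl 0).mul ((pymod_modEq mult mod_p).pow t.toNat)).add
      ((pymod_modEq inc mod_p).mul (pvGeo_modEq mod_p _ _ (pymod_modEq mult mod_p) t.toNat))).trans
      (show ((0:Int) * mult ^ t.toNat + inc * pvGeo mult t.toNat)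
          ≡ inc * pvGeo mult t.toNat [ZMOD mod_p] from by rw [zero_mul, zero_add])
  have HA := ((h1.trans c1).mul (pymod_modEq s0 mod_p)).add (h2.trans c2)
  have HB := ((pymod_modEq (mult ^ t.toNat) mod_p).mul (pymod_modEq s0 mod_p)).add
    ((Int.ModEq.refl inc).mul (pymod_modEq (pvGeo mult t.toNat) mod_p))
  rw [pymod_eq_of_modEq mod_p _ _ hp HA, pymod_eq_of_modEq mod_p _ _ hp HB]
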